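-- pv_equiv track=rewrite | github.com/cmkxak/algorithms | programmers/명예의전당.py | solution
-- ===== SOURCE A (Python) =====
-- def solution(k, score):
--     answer = []
--     honor = []
--     for i in score:
--         if len(honor) >= k:
--             if min(honor) < i:
--                 honor.remove(min(honor))
--                 honor.append(i)
--         else:
--             honor.append(i)
--         answer.append(min(honor))
--
--     return answer
-- ===== SOURCE B (Python) =====
-- def solution(k, score):
--     # Keep the k best scores seen so far in an ascending list `top`;
--     # its first element is the day's answer, no min() scans needed.
--     top = []
--     answer = []
--     for s in score:
--         if len(top) < k:
--             top = _ins(top, s)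
--         elif top[0] < s:
--             top = _ins(top[1:], s)
--         answer.append(top[0])
--     return answer
--
--
-- def _ins(xs, v):
--     # insert v into the ascending list xs, keeping it ascending
--     # (binary search for the insertion point)
--     lo, hi = 0, len(xs)
--     while lo < hi:
--         mid = (lo + hi) // 2
--         if xs[mid] <= v:
--             lo = mid + 1
--         else:
--             hi = mid
--     return xs[:lo] + [v] + xs[lo:]
-- ===== Notes on version B (the rewrite author's own statement) =====
-- stated objective: faster
-- what changed: B maintains the running top-k scores as an ascending sorted list (head = answer) updated by one hand-written binary-search insertion per day, instead of A's unordered list with two min() scans plus remove() per day.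
-- outside the precondition, e.g. on solution(0, [1]): A raises ValueError, B raises IndexError
import Mathlib
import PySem

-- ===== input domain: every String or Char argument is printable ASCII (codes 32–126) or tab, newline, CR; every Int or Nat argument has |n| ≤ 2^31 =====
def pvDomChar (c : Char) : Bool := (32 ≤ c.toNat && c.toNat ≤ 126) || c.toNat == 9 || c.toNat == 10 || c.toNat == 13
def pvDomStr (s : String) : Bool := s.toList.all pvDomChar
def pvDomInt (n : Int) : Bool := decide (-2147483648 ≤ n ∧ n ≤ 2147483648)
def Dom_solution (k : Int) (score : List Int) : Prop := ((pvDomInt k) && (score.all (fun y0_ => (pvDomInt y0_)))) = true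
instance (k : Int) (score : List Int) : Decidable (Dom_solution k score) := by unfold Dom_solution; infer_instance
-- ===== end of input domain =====

-- B keeps the running top-k scores as an ascending sorted list (head = answer), doing one
-- binary-search insertion per day instead of A's per-day min() scans and remove(); objective: alternative.

-- ===== PORT A =====
-- A's loop body: honor is an (unordered) list of the up-to-k best scores so far.
-- min(honor)/remove use PySem.List.min?/remove?; .getD is only reached when honor
-- is nonempty there (guaranteed under Pre_solution), where Python's min/remove return.
def stepA (k : Int) (honor : List Int) (i : Int) : List Int :=
  if k ≤ (honor.length : Int) then
    if (PySem.List.min? honor (fun y => y)).getD 0 < i then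
      ((PySem.List.remove? honor ((PySem.List.min? honor (fun y => y)).getD 0)).getD honor) ++ [i]
    else honor
  else honor ++ [i]

def loopA (k : Int) (answer honor : List Int) : List Int → List Int
  | [] => answer
  | i :: rest => loopA k (answer ++ [(PySem.List.min? (stepA k honor i) (fun y => y)).getD 0]) (stepA k honor i) rest

def solution (k : Int) (score : List Int) : List Int := loopA k [] [] score

-- ===== PORT B =====
-- Source B's _ins binary-search while loop (lo, hi are Nat indices; Python's mid is the
-- written-out (lo+hi)/2, xs[mid] is in range whenever lo < hi ≤ len xs, so getD is exact).
def insPos (xs : List Int) (v : Int) (lo hi : Nat) : Nat :=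
  if lo < hi then
    if xs.getD ((lo + hi) / 2) 0 ≤ v then insPos xs v ((lo + hi) / 2 + 1) hi
    else insPos xs v lo ((lo + hi) / 2)
  else lo
termination_by hi - lo
decreasing_by all_goals omega

-- xs[:lo] + [v] + xs[lo:] with 0 ≤ lo ≤ len xs is exactly take/drop
def insB (xs : List Int) (v : Int) : List Int :=
  xs.take (insPos xs v 0 xs.length) ++ v :: xs.drop (insPos xs v 0 xs.length)

-- Source B's loop body: top[0] via headD 0 (top is nonempty there under Pre_solution).
def stepB (k : Int) (top : List Int) (s : Int) : List Int :=
  if (top.length : Int) < k then insB top s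
  else if top.headD 0 < s then insB top.tail s
  else top

def loopB (k : Int) (answer top : List Int) : List Int → List Int
  | [] => answer
  | s :: rest => loopB k (answer ++ [(stepB k top s).headD 0]) (stepB k top s) rest

def solution_alt (k : Int) (score : List Int) : List Int := loopB k [] [] score

-- ===== PRECONDITION & SPEC =====
-- Pre_ excludes k ≤ 0 with nonempty score: there Python A raises ValueError
-- (min of an empty list) and B raises IndexError; neither returns.
def Pre_solution (k : Int) (score : List Int) : Prop := 1 ≤ k ∨ score = []
instance (k : Int) (score : List Int) : Decidable (Pre_solution k score) := by unfold Pre_solution; infer_instance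

def pvWitness_solution : Int × List Int := (3, [10, 100, 20, 150, 1, 100, 200])

def Spec_solution (k : Int) (score : List Int) (out : List Int) : Prop := out = solution_alt k score
instance (k : Int) (score : List Int) (out : List Int) : Decidable (Spec_solution k score out) := by unfold Spec_solution; infer_instance

-- ===== CLAIM (what is proved, stated in full; the proofs are below) =====
def Claim_equal_solution : Prop := ∀ (k : Int) (score : List Int), Dom_solution k score → Pre_solution k score → Spec_solution k score (solution k score)

-- ===== LEMMAS AND PROOFS =====

-- proof-only reference: insertion into an ascending list, as structural recursion
def insAsc (xs : List Int) (v : Int) : List Int :=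
  match xs with
  | [] => [v]
  | x :: t => if x ≤ v then x :: insAsc t v else v :: x :: t

lemma insAsc_perm (xs : List Int) (v : Int) : (insAsc xs v).Perm (v :: xs) := by
  induction xs with
  | nil => simp [insAsc]
  | cons x t ih =>
    by_cases h : x ≤ v
    · simpa [insAsc, h] using ((ih.cons x).trans (List.Perm.swap v x t))
    · simp [insAsc, h]

lemma insAsc_ne_nil (xs : List Int) (v : Int) : insAsc xs v ≠ [] := by
  intro h0
  have := (insAsc_perm xs v).length_eq
  rw [h0] at this
  simp at this

lemma insAsc_pairwise (xs : List Int) (v : Int) (h : xs.Pairwise (· ≤ ·)) :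
    (insAsc xs v).Pairwise (· ≤ ·) := by
  induction xs with
  | nil => simp [insAsc]
  | cons x t ih =>
    rcases List.pairwise_cons.mp h with ⟨hx, ht⟩
    by_cases hxv : x ≤ v
    · rw [show insAsc (x :: t) v = x :: insAsc t v from by simp [insAsc, hxv]]
      refine List.pairwise_cons.mpr ⟨?_, ih ht⟩
      intro y hy
      rcases List.mem_cons.mp ((insAsc_perm t v).mem_iff.mp hy) with rfl | hyt
      · exact hxv
      · exact hx y hyt
    · rw [show insAsc (x :: t) v = v :: x :: t from by simp [insAsc, hxv]]
      refine List.pairwise_cons.mpr ⟨?_, h⟩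
      intro y hy
      rcases List.mem_cons.mp hy with rfl | hyt
      · exact (not_le.mp hxv).le
      · exact le_trans (not_le.mp hxv).le (hx y hyt)

lemma sorted_getD_mono (xs : List Int) (hs : xs.Pairwise (· ≤ ·)) {i j : Nat}
    (hij : i ≤ j) (hj : j < xs.length) : xs.getD i 0 ≤ xs.getD j 0 := by
  rcases eq_or_lt_of_le hij with rfl | hlt
  · exact le_refl _
  · have hi : i < xs.length := lt_trans hlt hj
    rw [List.getD_eq_getElem xs 0 hi, List.getD_eq_getElem xs 0 hj]
    exact (List.pairwise_iff_getElem.mp hs) i j hi hj hlt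

-- Any split point whose left part is ≤ v and right part is > v names insAsc's output.
lemma insAsc_eq_split (v : Int) : ∀ (xs : List Int) (r : Nat), r ≤ xs.length →
    (∀ i, i < r → xs.getD i 0 ≤ v) → (∀ i, r ≤ i → i < xs.length → v < xs.getD i 0) →
    insAsc xs v = xs.take r ++ v :: xs.drop r := by
  intro xs
  induction xs with
  | nil =>
    intro r hr _ _
    have : r = 0 := Nat.le_zero.mp (by simpa using hr)
    subst this
    simp [insAsc]
  | cons x t ih =>
    intro r hr hL hR
    cases r with
    | zero =>
      have hvx : v < x := by simpa using hR 0 (le_refl 0) (by simp)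
      simp [insAsc, not_le.mpr hvx]
    | succ r' =>
      have hx : x ≤ v := by simpa using hL 0 (Nat.succ_pos r')
      rw [show insAsc (x :: t) v = x :: insAsc t v from by simp [insAsc, hx]]
      rw [ih r' (by simpa using hr)
        (fun i hi => by simpa using hL (i + 1) (by omega))
        (fun i hge hlen => by simpa using hR (i + 1) (by omega) (by simpa using Nat.succ_lt_succ hlen))]
      simp

-- The binary search keeps its invariant: everything left of lo is ≤ v, everything from hi on is > v.
lemma insPos_spec (xs : List Int) (v : Int) (hs : xs.Pairwise (· ≤ ·)) :
    ∀ (d lo hi : Nat), hi - lo ≤ d → lo ≤ hi → hi ≤ xs.length →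
      (∀ i, i < lo → xs.getD i 0 ≤ v) →
      (∀ i, hi ≤ i → i < xs.length → v < xs.getD i 0) →
      insPos xs v lo hi ≤ xs.length ∧
      (∀ i, i < insPos xs v lo hi → xs.getD i 0 ≤ v) ∧
      (∀ i, insPos xs v lo hi ≤ i → i < xs.length → v < xs.getD i 0) := by
  intro d
  induction d with
  | zero =>
    intro lo hi hd hlohi hhi hL hR
    have hle : hi = lo := by omega
    rw [insPos, if_neg (by omega)]
    exact ⟨by omega, hL, fun i h1 h2 => hR i (by omega) h2⟩
  | succ d ih =>
    intro lo hi hd hlohi hhi hL hR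
    by_cases h : lo < hi
    · rw [insPos, if_pos h]
      have hm1 : lo ≤ (lo + hi) / 2 := by omega
      have hm2 : (lo + hi) / 2 < hi := by omega
      by_cases hc : xs.getD ((lo + hi) / 2) 0 ≤ v
      · rw [if_pos hc]
        refine ih ((lo + hi) / 2 + 1) hi (by omega) (by omega) hhi ?_ hR
        intro i hi'
        exact le_trans (sorted_getD_mono xs hs (by omega : i ≤ (lo + hi) / 2) (by omega)) hc
      · rw [if_neg hc]
        refine ih lo ((lo + hi) / 2) (by omega) (by omega) (by omega) hL ?_
        intro i hge hilen
        exact lt_of_lt_of_le (not_le.mp hc) (sorted_getD_mono xs hs hge hilen)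
    · rw [insPos, if_neg h]
      exact ⟨by omega, hL, fun i h1 h2 => hR i (by omega) h2⟩

lemma insB_eq_insAsc (xs : List Int) (v : Int) (hs : xs.Pairwise (· ≤ ·)) :
    insB xs v = insAsc xs v := by
  obtain ⟨h2, h3, h4⟩ :=
    insPos_spec xs v hs xs.length 0 xs.length (by omega) (by omega) (le_refl _)
      (fun i hi => absurd hi (Nat.not_lt_zero i))
      (fun i h hlen => absurd hlen (by omega))
  exact (insAsc_eq_split v xs _ h2 h3 h4).symm

lemma min?_perm_eq {xs ys : List Int} (h : xs.Perm ys) :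
    PySem.List.min? xs (fun y => y) = PySem.List.min? ys (fun y => y) := by
  cases hx : PySem.List.min? xs (fun y => y) with
  | none =>
    have hxs := (PySem.List.min?_eq_none_iff xs (fun y => y)).mp hx
    subst hxs
    have hys : ys = [] := List.perm_nil.mp h.symm
    subst hys
    exact hx.symm
  | some m =>
    have hysne : ys ≠ [] := by
      intro h0; subst h0
      have := (PySem.List.min?_eq_none_iff xs (fun y => y)).mpr (List.perm_nil.mp h)
      simp [this] at hx
    cases hy : PySem.List.min? ys (fun y => y) with
    | none => exact absurd ((PySem.List.min?_eq_none_iff ys (fun y => y)).mp hy) hysne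
    | some m' =>
      have hm : m ∈ xs := PySem.List.min?_mem hx
      have hm' : m' ∈ ys := PySem.List.min?_mem hy
      have h1 : m ≤ m' := PySem.List.min?_isMin hx m' (h.symm.subset hm')
      have h2 : m' ≤ m := PySem.List.min?_isMin hy m (h.subset hm)
      simp [le_antisymm h1 h2]

lemma min?_sorted_head {x : Int} {t : List Int} (h : (x :: t).Pairwise (· ≤ ·)) :
    PySem.List.min? (x :: t) (fun y => y) = some x := by
  cases hm : PySem.List.min? (x :: t) (fun y => y) with
  | none =>
    have := (PySem.List.min?_eq_none_iff (x :: t) (fun y => y)).mp hm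
    simp at this
  | some m =>
    have hmem : m ∈ x :: t := PySem.List.min?_mem hm
    have h1 : m ≤ x := PySem.List.min?_isMin hm x (by simp)
    have h2 : x ≤ m := by
      rcases List.mem_cons.mp hmem with rfl | hmt
      · exact le_refl _
      · exact (List.pairwise_cons.mp h).1 m hmt
    simp [le_antisymm h1 h2]

-- One step of A and one step of B stay related: same multiset, B's list ascending, nonempty.
lemma step_sim (k i : Int) (hk : 1 ≤ k) {honor top : List Int}
    (hp : honor.Perm top) (hs : top.Pairwise (· ≤ ·)) :
    (stepA k honor i).Perm (stepB k top i) ∧ (stepB k top i).Pairwise (· ≤ ·) ∧ stepB k top i ≠ [] := by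
  have hlen : honor.length = top.length := hp.length_eq
  by_cases hfull : k ≤ (honor.length : Int)
  · -- honor (hence top) has length ≥ k ≥ 1 : top = x :: t
    have htne : top ≠ [] := by
      intro h0; subst h0
      simp only [List.length_nil] at hlen
      rw [hlen] at hfull; simp at hfull; omega
    obtain ⟨x, t, rfl⟩ := List.exists_cons_of_ne_nil htne
    have hmin : PySem.List.min? honor (fun y => y) = some x :=
      (min?_perm_eq hp).trans (min?_sorted_head hs)
    have hBfull : ¬ (((x :: t).length : Int) < k) := by
      have hc : ((x :: t).length : Int) = (honor.length : Int) := by exact_mod_cast hlen.symm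
      rw [hc]; omega
    have hst : t.Pairwise (· ≤ ·) := (List.pairwise_cons.mp hs).2
    by_cases hlt : x < i
    · -- replace the minimum
      have hxmem : x ∈ honor := hp.symm.subset (by simp)
      have hrem : PySem.List.remove? honor x = some (honor.erase x) :=
        PySem.List.remove?_eq_some_erase _ _ hxmem
      have herase : (honor.erase x).Perm t := (hp.erase x).trans (by simp)
      have hperm : (honor.erase x ++ [i]).Perm (insAsc t i) := by
        refine List.Perm.trans ?_ (insAsc_perm t i).symm
        exact (List.perm_append_comm).trans (herase.cons i)
      refine ⟨?_, ?_, ?_⟩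
      · simp only [stepA, stepB, hmin, Option.getD_some, hrem, List.headD_cons, List.tail_cons,
          if_pos hfull, if_neg hBfull, if_pos hlt]
        rw [insB_eq_insAsc t i hst]
        exact hperm
      · simp only [stepB, List.headD_cons, List.tail_cons, if_neg hBfull, if_pos hlt]
        rw [insB_eq_insAsc t i hst]
        exact insAsc_pairwise t i hst
      · simp only [stepB, List.headD_cons, List.tail_cons, if_neg hBfull, if_pos hlt]
        rw [insB_eq_insAsc t i hst]
        exact insAsc_ne_nil t i
    · refine ⟨?_, ?_, ?_⟩
      · simp only [stepA, stepB, hmin, Option.getD_some, List.headD_cons,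
          if_pos hfull, if_neg hBfull, if_neg hlt]
        exact hp
      · simp only [stepB, List.headD_cons, if_neg hBfull, if_neg hlt]
        exact hs
      · simp only [stepB, List.headD_cons, if_neg hBfull, if_neg hlt]
        simp
  · -- room left: both append/insert i
    have hBroom : ((top.length : Int)) < k := by
      have hc : (honor.length : Int) = (top.length : Int) := by exact_mod_cast hlen
      omega
    refine ⟨?_, ?_, ?_⟩
    · simp only [stepA, stepB, if_neg hfull, if_pos hBroom]
      rw [insB_eq_insAsc top i hs]
      exact (List.perm_append_comm).trans ((hp.cons i).trans (insAsc_perm top i).symm)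
    · simp only [stepB, if_pos hBroom]
      rw [insB_eq_insAsc top i hs]
      exact insAsc_pairwise top i hs
    · simp only [stepB, if_pos hBroom]
      rw [insB_eq_insAsc top i hs]
      exact insAsc_ne_nil top i

lemma min_getD_eq_headD {h t : List Int} (hp : h.Perm t) (hs : t.Pairwise (· ≤ ·)) (hne : t ≠ []) :
    (PySem.List.min? h (fun y => y)).getD 0 = t.headD 0 := by
  obtain ⟨x, u, rfl⟩ := List.exists_cons_of_ne_nil hne
  rw [min?_perm_eq hp, min?_sorted_head hs]
  rfl

lemma loop_sim (k : Int) (hk : 1 ≤ k) :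
    ∀ (rest ans honor top : List Int), honor.Perm top → top.Pairwise (· ≤ ·) →
      loopA k ans honor rest = loopB k ans top rest := by
  intro rest
  induction rest with
  | nil => intro ans honor top _ _; rfl
  | cons i r ih =>
    intro ans honor top hp hs
    obtain ⟨hperm', hsort', hne'⟩ := step_sim k i hk hp hs
    have hmin : (PySem.List.min? (stepA k honor i) (fun y => y)).getD 0 = (stepB k top i).headD 0 :=
      min_getD_eq_headD hperm' hsort' hne'
    simp only [loopA, loopB, hmin]
    exact ih _ _ _ hperm' hsort'

-- ===== VERDICT (by name: the statement is the Claim_ definition above) =====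
theorem solution_spec : Claim_equal_solution := by
  intro k score _ hpre
  unfold Spec_solution solution solution_alt
  rcases hpre with hk | hnil
  · exact loop_sim k hk score [] [] [] (List.Perm.refl _) (by simp)
  · subst hnil; rfl
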